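-- pv_equiv track=rewrite | github.com/folkertvanheusden/DotXT | tests/flags.py | flags_rcr
-- ===== SOURCE A (Python) =====
-- def flags_rcr(val: int, count: int, carry: int, width: int, set_flag_o: bool):
--     check_bit = 32768 if width == 16 else 128
--
--     for i in range(0, count):
--         b0 = val & 1
--         val >>= 1
--         val |= check_bit if carry else 0
--         carry = b0
--         val &= 0xff if width == 8 else 65535
--
--     flag_o = False
--     mask = ~0
--
--     if set_flag_o:
--         check_bit2 = 16384 if width == 16 else 64
--         flag_o = (True if val & check_bit2 else 0) ^ (True if val & check_bit else False)
--
--     else: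
--         mask = ~2048
--
--     flags = (1 if carry else 0) + (2048 if flag_o else 0)
--
--     return (val, flags, mask & 0xffff)
-- ===== SOURCE B (Python) =====
-- def flags_rcr(val: int, count: int, carry: int, width: int, set_flag_o: bool):
--     # O(1): after at most 9 normalizing steps the state is a pure (w+1)-bit
--     # rotate-through-carry ring, so the remaining steps reduce mod (w+1).
--     check_bit = 0x8000 if width == 16 else 0x80
--     vmask = 0xff if width == 8 else 0xffff
--     w = 16 if width == 16 else 8
--     ring = w + 1
--
--     def step(v, c):
--         return ((v >> 1) | (check_bit if c else 0)) & vmask, v & 1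
--
--     n = count if count <= 9 else 9
--     for _ in range(n):
--         val, carry = step(val, carry)
--     extra = count - n
--     if extra > 0:
--         r = extra % ring
--         comb = ((1 if carry else 0) << w) | val
--         comb = ((comb >> r) | (comb << (ring - r))) & ((1 << ring) - 1)
--         val = comb & ((1 << w) - 1)
--         carry = comb >> w
--
--     flag_o = False
--     mask = ~0
--     if set_flag_o:
--         check_bit2 = 0x4000 if width == 16 else 0x40
--         flag_o = bool(val & check_bit2) != bool(val & check_bit)
--     else:
--         mask = ~2048
--     flags = (1 if carry else 0) + (2048 if flag_o else 0)
--     return (val, flags, mask & 0xffff)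
-- ===== Notes on version B (the rewrite author's own statement) =====
-- stated objective: faster
-- what changed: A rotates through carry one bit per loop iteration (O(count)); B performs at most 9 normalizing steps and then computes the remaining rotation in O(1) with shifts/or/mask after reducing the remaining count mod (w+1).
import Mathlib
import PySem

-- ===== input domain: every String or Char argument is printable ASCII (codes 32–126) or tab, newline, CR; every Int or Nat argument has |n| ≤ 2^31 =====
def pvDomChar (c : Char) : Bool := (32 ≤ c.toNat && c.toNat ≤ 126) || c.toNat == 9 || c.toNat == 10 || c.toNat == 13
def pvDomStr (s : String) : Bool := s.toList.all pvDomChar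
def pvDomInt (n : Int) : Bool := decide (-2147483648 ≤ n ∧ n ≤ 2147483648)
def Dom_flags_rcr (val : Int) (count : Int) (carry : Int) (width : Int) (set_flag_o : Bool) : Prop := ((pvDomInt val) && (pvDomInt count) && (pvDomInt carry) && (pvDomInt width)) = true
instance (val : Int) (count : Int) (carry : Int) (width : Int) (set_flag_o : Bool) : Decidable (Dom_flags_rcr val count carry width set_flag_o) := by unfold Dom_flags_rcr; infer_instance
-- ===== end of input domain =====

-- B replaces A's O(count) rotate-through-carry loop by at most 9 normalizing steps
-- followed by an O(1) bit rotation of the (w+1)-bit ring by (remaining count) mod (w+1).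

-- ===== PORT A =====
-- the body of A's for-loop, on the state (val, carry); 'if s.2 ≠ 0' is Python's truthiness of carry
def rcrStepA (width check_bit : Int) (s : Int × Int) : Int × Int :=
  let b0 := PySem.Int.band s.1 1
  let v := s.1 >>> (1 : Nat)
  let v := PySem.Int.bor v (if s.2 ≠ 0 then check_bit else 0)
  let v := PySem.Int.band v (if width = 8 then 255 else 65535)
  (v, b0)

def flags_rcr (val : Int) (count : Int) (carry : Int) (width : Int) (set_flag_o : Bool) : List Int :=
  let check_bit : Int := if width = 16 then 32768 else 128
  let s := (PySem.List.pyRange 0 count).foldl (fun s _ => rcrStepA width check_bit s) (val, carry)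
  let val := s.1
  let carry := s.2
  -- Python's flag_o is one of False/True/0/1 and is only used for its truthiness, so Bool.xor is exact
  let fm : Bool × Int :=
    if set_flag_o then
      let check_bit2 : Int := if width = 16 then 16384 else 64
      (Bool.xor (PySem.Int.band val check_bit2 != 0) (PySem.Int.band val check_bit != 0), Int.not 0)
    else (false, Int.not 2048)
  let flags : Int := (if carry ≠ 0 then 1 else 0) + (if fm.1 then 2048 else 0)
  [val, flags, PySem.Int.band fm.2 65535]

-- ===== PORT B =====
-- Source B's step(v, c)
def rcrStepB (check_bit vmask : Int) (s : Int × Int) : Int × Int :=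
  (PySem.Int.band (PySem.Int.bor (s.1 >>> (1 : Nat)) (if s.2 ≠ 0 then check_bit else 0)) vmask,
   PySem.Int.band s.1 1)

-- Source B's state after the settle loop and the O(1) modular rotation
def rcrStateB (val count carry width : Int) : Int × Int :=
  let check_bit : Int := if width = 16 then 32768 else 128
  let vmask : Int := if width = 8 then 255 else 65535
  let w : Nat := if width = 16 then 16 else 8
  let ring : Nat := w + 1
  let n : Int := if count ≤ 9 then count else 9
  let s := (PySem.List.pyRange 0 n).foldl (fun s _ => rcrStepB check_bit vmask s) (val, carry)
  let extra : Int := count - n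
  if 0 < extra then
    -- extra > 0 and ring > 0, so Python's 'extra % ring' is the nonnegative emod: .toNat is exact
    let r : Nat := (PySem.Int.mod extra (ring : Int)).toNat
    let comb := PySem.Int.bor ((if s.2 ≠ 0 then (1 : Int) else 0) <<< w) s.1
    let comb := PySem.Int.band (PySem.Int.bor (comb >>> r) (comb <<< (ring - r))) ((1 <<< ring) - 1)
    (PySem.Int.band comb ((1 <<< w) - 1), comb >>> w)
  else s

def flags_rcr_alt (val : Int) (count : Int) (carry : Int) (width : Int) (set_flag_o : Bool) : List Int :=
  let check_bit : Int := if width = 16 then 32768 else 128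
  let s := rcrStateB val count carry width
  let val := s.1
  let carry := s.2
  let fm : Bool × Int :=
    if set_flag_o then
      let check_bit2 : Int := if width = 16 then 16384 else 64
      (Bool.xor (PySem.Int.band val check_bit2 != 0) (PySem.Int.band val check_bit != 0), Int.not 0)
    else (false, Int.not 2048)
  let flags : Int := (if carry ≠ 0 then 1 else 0) + (if fm.1 then 2048 else 0)
  [val, flags, PySem.Int.band fm.2 65535]

-- ===== PRECONDITION & SPEC =====
def Spec_flags_rcr (val : Int) (count : Int) (carry : Int) (width : Int) (set_flag_o : Bool) (out : List Int) : Prop := out = flags_rcr_alt val count carry width set_flag_o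
instance (val : Int) (count : Int) (carry : Int) (width : Int) (set_flag_o : Bool) (out : List Int) : Decidable (Spec_flags_rcr val count carry width set_flag_o out) := by unfold Spec_flags_rcr; infer_instance

-- ===== CLAIM (what is proved, stated in full; the proofs are below) =====
def Claim_equal_flags_rcr : Prop := ∀ (val : Int) (count : Int) (carry : Int) (width : Int) (set_flag_o : Bool), Dom_flags_rcr val count carry width set_flag_o → Spec_flags_rcr val count carry width set_flag_o (flags_rcr val count carry width set_flag_o)

-- ===== LEMMAS AND PROOFS =====

-- the pure (w+1)-bit rotate-right-by-one on the combined number carry*2^w + val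
def rotC (w : Nat) (N : Nat) : Nat := N / 2 + N % 2 * 2 ^ w

-- a fold that ignores the list elements is an iterate
theorem foldl_const_iterate {α β : Type} (f : α → α) (l : List β) (x : α) :
    l.foldl (fun s _ => f s) x = f^[l.length] x := by
  induction l generalizing x with
  | nil => rfl
  | cons a t ih => simp [List.foldl_cons, ih, Function.iterate_succ_apply]

theorem length_pyRange0 (n : Int) : (PySem.List.pyRange 0 n).length = n.toNat := by
  rw [PySem.List.pyRange_of_pos 0 n (by norm_num)]
  simp only [List.length_map, List.length_range]
  have he : n - 0 + 1 - 1 = n := by ring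
  rw [he, Int.ediv_one]
  split_ifs with h <;> omega

-- the two step functions are the same function
theorem stepAB (width check_bit : Int) :
    rcrStepA width check_bit = rcrStepB check_bit (if width = 8 then 255 else 65535) := by
  funext s
  simp [rcrStepA, rcrStepB]

theorem band_le_right (a b : Int) (hb : 0 ≤ b) : PySem.Int.band a b ≤ b := by
  unfold PySem.Int.band
  have hbt := Int.toNat_of_nonneg hb
  by_cases h1 : 0 ≤ a
  · rw [if_pos h1, if_pos hb]
    calc ((a.toNat &&& b.toNat : Nat) : Int) ≤ ((b.toNat : Nat) : Int) := by exact_mod_cast Nat.and_le_right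
      _ = b := hbt
  · rw [if_neg h1, if_pos hb]
    have : ((b.toNat - (b.toNat &&& (-a - 1).toNat) : Nat) : Int) ≤ ((b.toNat : Nat) : Int) := by
      exact_mod_cast Nat.sub_le _ _
    omega

theorem band_le_left (a b : Int) (ha : 0 ≤ a) : PySem.Int.band a b ≤ a := by
  unfold PySem.Int.band
  have hat := Int.toNat_of_nonneg ha
  rw [if_pos ha]
  by_cases h2 : 0 ≤ b
  · rw [if_pos h2]
    calc ((a.toNat &&& b.toNat : Nat) : Int) ≤ ((a.toNat : Nat) : Int) := by exact_mod_cast Nat.and_le_left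
      _ = a := hat
  · rw [if_neg h2]
    have : ((a.toNat - (a.toNat &&& (-b - 1).toNat) : Nat) : Int) ≤ ((a.toNat : Nat) : Int) := by
      exact_mod_cast Nat.sub_le _ _
    omega

theorem band_nonneg' (a b : Int) (hb : 0 ≤ b) : 0 ≤ PySem.Int.band a b := by
  rw [PySem.Int.band_comm]; exact PySem.Int.band_nonneg_of_nonneg_left a hb

-- after one step the state is a pair of naturals, val below 2^mw, carry a bit
theorem step_bound (cb M : Int) (mw : Nat) (hM : M = ((2 ^ mw - 1 : Nat) : Int)) (s : Int × Int) :
    ∃ v c : Nat, rcrStepB cb M s = (↑v, ↑c) ∧ v < 2 ^ mw ∧ c < 2 := by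
  have hM0 : (0:Int) ≤ M := by rw [hM]; positivity
  have h0 : 0 ≤ PySem.Int.band (PySem.Int.bor (s.1 >>> (1:Nat)) (if s.2 ≠ 0 then cb else 0)) M :=
    band_nonneg' _ _ hM0
  have h1 : PySem.Int.band (PySem.Int.bor (s.1 >>> (1:Nat)) (if s.2 ≠ 0 then cb else 0)) M ≤ M :=
    band_le_right _ _ hM0
  have hc0 : 0 ≤ PySem.Int.band s.1 1 := by
    rw [PySem.Int.band_one]; exact PySem.Int.mod_nonneg _ (by norm_num)
  have hc1 : PySem.Int.band s.1 1 < 2 := by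
    rw [PySem.Int.band_one]; exact PySem.Int.mod_lt _ (by norm_num)
  have hP : 1 ≤ 2 ^ mw := Nat.one_le_two_pow
  refine ⟨(PySem.Int.band (PySem.Int.bor (s.1 >>> (1:Nat)) (if s.2 ≠ 0 then cb else 0)) M).toNat,
    (PySem.Int.band s.1 1).toNat, ?_, ?_, ?_⟩
  · simp only [rcrStepB, Int.toNat_of_nonneg h0, Int.toNat_of_nonneg hc0]
  · omega
  · omega

-- one step keeps the val bound shrinking down to 2^w (check_bit only touches bit w-1)
theorem step_shrink (cb M : Int) (w j : Nat) (hw : 1 ≤ w) (hj : w ≤ j)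
    (hcb : cb = ((2 ^ (w - 1) : Nat) : Int))
    (v c : Nat) (hv : v < 2 ^ (j + 1)) (hc : c < 2) :
    ∃ v' c' : Nat, rcrStepB cb M ((v : Int), (c : Int)) = (↑v', ↑c') ∧ v' < 2 ^ j ∧ c' < 2 := by
  have hsr : ((v : Int) >>> (1 : Nat)) = ((v >>> 1 : Nat) : Int) := rfl
  have hvd : v >>> 1 = v / 2 := by rw [Nat.shiftRight_eq_div_pow, pow_one]
  have h2j : 2 ^ (j + 1) = 2 * 2 ^ j := by rw [pow_succ]; ring
  have hdj : v / 2 < 2 ^ j := by omega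
  -- the or'ed value is a natural below 2^j
  have key : ∃ u : Nat, PySem.Int.bor ((v : Int) >>> (1:Nat)) (if (c : Int) ≠ 0 then cb else 0) = ↑u ∧ u < 2 ^ j := by
    obtain rfl | rfl : c = 0 ∨ c = 1 := by omega
    · refine ⟨v / 2, ?_, hdj⟩
      rw [if_neg (by norm_num), PySem.Int.bor_zero, hsr, hvd]
    · refine ⟨v / 2 ||| 2 ^ (w - 1), ?_, ?_⟩
      · rw [if_pos (by norm_num), hsr, hvd, hcb, PySem.Int.bor_natCast]
      · exact Nat.or_lt_two_pow hdj (Nat.pow_lt_pow_right (by norm_num) (by omega))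
  obtain ⟨u, hu, hult⟩ := key
  have h0 : 0 ≤ PySem.Int.band (↑u) M := PySem.Int.band_nonneg_of_nonneg_left M (by positivity)
  have h1 : PySem.Int.band (↑u) M ≤ ↑u := band_le_left _ _ (by positivity)
  have hc0 : 0 ≤ PySem.Int.band (v : Int) 1 := by
    rw [PySem.Int.band_one]; exact PySem.Int.mod_nonneg _ (by norm_num)
  have hc1 : PySem.Int.band (v : Int) 1 < 2 := by
    rw [PySem.Int.band_one]; exact PySem.Int.mod_lt _ (by norm_num)
  refine ⟨(PySem.Int.band (↑u) M).toNat, (PySem.Int.band (v : Int) 1).toNat, ?_, ?_, ?_⟩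
  · simp only [rcrStepB, hu, Int.toNat_of_nonneg h0, Int.toNat_of_nonneg hc0]
  · omega
  · omega

-- on pure states the step is the (w+1)-bit rotate-through-carry, read through the combined number
theorem step_pure (cb M : Int) (w mw : Nat) (hw : 1 ≤ w) (hm : w ≤ mw)
    (hcb : cb = ((2 ^ (w - 1) : Nat) : Int)) (hM : M = ((2 ^ mw - 1 : Nat) : Int))
    (v c : Nat) (hv : v < 2 ^ w) (hc : c < 2) :
    rcrStepB cb M ((v : Int), (c : Int))
      = (↑(rotC w (c * 2 ^ w + v) % 2 ^ w), ↑(rotC w (c * 2 ^ w + v) / 2 ^ w)) := by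
  have hsr : ((v : Int) >>> (1 : Nat)) = ((v >>> 1 : Nat) : Int) := rfl
  have hvd : v >>> 1 = v / 2 := by rw [Nat.shiftRight_eq_div_pow, pow_one]
  have hww : w - 1 + 1 = w := by omega
  have h2w : 2 ^ w = 2 * 2 ^ (w - 1) := by
    conv_lhs => rw [← hww]
    rw [pow_succ]; ring
  have hdw : v / 2 < 2 ^ (w - 1) := by omega
  -- the or'ed value is exactly u = v/2 + c*2^(w-1)
  have key : PySem.Int.bor ((v : Int) >>> (1:Nat)) (if (c : Int) ≠ 0 then cb else 0)
      = ((v / 2 + c * 2 ^ (w - 1) : Nat) : Int) := by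
    obtain rfl | rfl : c = 0 ∨ c = 1 := by omega
    · rw [if_neg (by norm_num), PySem.Int.bor_zero, hsr, hvd]; norm_num
    · rw [if_pos (by norm_num), hsr, hvd, hcb, PySem.Int.bor_natCast]
      have := Nat.two_pow_add_eq_or_of_lt (i := w - 1) hdw 1
      norm_num at this
      rw [Nat.lor_comm, ← this]
      push_cast; ring
  have hu : v / 2 + c * 2 ^ (w - 1) < 2 ^ w := by
    have : c * 2 ^ (w - 1) ≤ 1 * 2 ^ (w - 1) := Nat.mul_le_mul_right _ (by omega)
    omega
  have humw : v / 2 + c * 2 ^ (w - 1) < 2 ^ mw :=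
    lt_of_lt_of_le hu (Nat.pow_le_pow_right (by norm_num) hm)
  have hband : PySem.Int.band ((v / 2 + c * 2 ^ (w - 1) : Nat) : Int) M
      = ((v / 2 + c * 2 ^ (w - 1) : Nat) : Int) := by
    rw [hM, PySem.Int.band_natCast, Nat.and_two_pow_sub_one_eq_mod, Nat.mod_eq_of_lt humw]
  have hcv : PySem.Int.band (v : Int) 1 = ((v % 2 : Nat) : Int) := by
    have : ((1:Int)) = ((1:Nat) : Int) := rfl
    rw [this, PySem.Int.band_natCast, Nat.and_one_is_mod]
  -- arithmetic of the combined rotate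
  have hN2 : (c * 2 ^ w + v) / 2 = c * 2 ^ (w - 1) + v / 2 := by
    obtain rfl | rfl : c = 0 ∨ c = 1 := by omega
    all_goals omega
  have hNm : (c * 2 ^ w + v) % 2 = v % 2 := by
    obtain rfl | rfl : c = 0 ∨ c = 1 := by omega
    all_goals omega
  have hrot : rotC w (c * 2 ^ w + v) = v % 2 * 2 ^ w + (v / 2 + c * 2 ^ (w - 1)) := by
    unfold rotC; rw [hN2, hNm]; ring
  have hmod : rotC w (c * 2 ^ w + v) % 2 ^ w = v / 2 + c * 2 ^ (w - 1) := by
    rw [hrot, mul_comm (v % 2), Nat.mul_add_mod, Nat.mod_eq_of_lt hu]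
  have hdiv : rotC w (c * 2 ^ w + v) / 2 ^ w = v % 2 := by
    rw [hrot, mul_comm (v % 2), Nat.mul_add_div (by positivity), Nat.div_eq_of_lt hu]
    omega
  simp only [rcrStepB, key, hband, hcv, hmod, hdiv]

theorem rotC_lt (w N : Nat) (h : N < 2 ^ (w + 1)) : rotC w N < 2 ^ (w + 1) := by
  unfold rotC
  have h1 : N / 2 < 2 ^ w := by rw [pow_succ] at h; omega
  have h2 : N % 2 ≤ 1 := by omega
  have h3 : N % 2 * 2 ^ w ≤ 1 * 2 ^ w := Nat.mul_le_mul_right _ h2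
  rw [pow_succ]; omega

theorem rotC_formula (w : Nat) : ∀ k, k ≤ w + 1 → ∀ N, N < 2 ^ (w + 1) →
    (rotC w)^[k] N = N / 2 ^ k + N % 2 ^ k * 2 ^ (w + 1 - k) := by
  intro k
  induction k with
  | zero => intro _ N _; simp [Nat.mod_one]
  | succ k ih =>
    intro hk N hN
    rw [Function.iterate_succ_apply', ih (by omega) N hN]
    set D := N / 2 ^ k with hD
    set R := N % 2 ^ k with hR
    have he : w + 1 - k = (w - k) + 1 := by omega
    have h2e : 2 ^ (w + 1 - k) = 2 * 2 ^ (w - k) := by rw [he, pow_succ]; ring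
    set Q := R * 2 ^ (w - k) with hQdef
    have hQ : R * 2 ^ (w + 1 - k) = 2 * Q := by rw [hQdef, h2e]; ring
    unfold rotC
    rw [hQ]
    have e1 : (D + 2 * Q) / 2 = D / 2 + Q := by omega
    have e2 : (D + 2 * Q) % 2 = D % 2 := by omega
    rw [e1, e2]
    have h3 : w + 1 - (k + 1) = w - k := by omega
    rw [h3]
    have h4 : N / 2 ^ (k + 1) = D / 2 := by rw [pow_succ, ← Nat.div_div_eq_div_mul]
    have hdm : 2 ^ k * D + R = N := Nat.div_add_mod N (2 ^ k)
    have hDd : 2 * (D / 2) + D % 2 = D := Nat.div_add_mod D 2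
    have hRlt : R < 2 ^ k := Nat.mod_lt _ (by positivity)
    have h5 : N % 2 ^ (k + 1) = D % 2 * 2 ^ k + R := by
      have hsplit : 2 ^ (k + 1) * (D / 2) + (D % 2 * 2 ^ k + R) = N := by
        rw [pow_succ]
        calc 2 ^ k * 2 * (D / 2) + (D % 2 * 2 ^ k + R)
            = 2 ^ k * (2 * (D / 2) + D % 2) + R := by ring
          _ = 2 ^ k * D + R := by rw [hDd]
          _ = N := hdm
      rw [← hsplit, Nat.mul_add_mod]
      apply Nat.mod_eq_of_lt
      have hb : D % 2 ≤ 1 := by omega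
      have hbb : D % 2 * 2 ^ k ≤ 2 ^ k := by nlinarith
      rw [pow_succ]; omega
    rw [h4, h5]
    have hpow : (2 : Nat) ^ k * 2 ^ (w - k) = 2 ^ w := by rw [← pow_add]; congr 1; omega
    have hfin : (D % 2 * 2 ^ k + R) * 2 ^ (w - k) = D % 2 * 2 ^ w + Q := by
      rw [add_mul, mul_assoc, hpow, hQdef]
    rw [hfin]
    ring

theorem rotC_period (w : Nat) (N : Nat) (h : N < 2 ^ (w + 1)) :
    (rotC w)^[w + 1] N = N := by
  rw [rotC_formula w (w + 1) le_rfl N h, Nat.div_eq_of_lt h, Nat.mod_eq_of_lt h]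
  simp

theorem rotC_iter_lt (w : Nat) : ∀ (k N : Nat), N < 2 ^ (w + 1) → (rotC w)^[k] N < 2 ^ (w + 1) := by
  intro k
  induction k with
  | zero => intro N hN; simpa using hN
  | succ k ih =>
    intro N hN
    rw [Function.iterate_succ_apply]
    exact ih _ (rotC_lt w N hN)

theorem rotC_iter_mul (w : Nat) : ∀ (q N : Nat), N < 2 ^ (w + 1) → (rotC w)^[(w + 1) * q] N = N := by
  intro q
  induction q with
  | zero => intro N _; simp
  | succ q ih =>
    intro N hN
    rw [Nat.mul_succ, Function.iterate_add_apply, rotC_period w N hN]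
    exact ih N hN

theorem rotC_iter_mod (w : Nat) (m : Nat) (N : Nat) (h : N < 2 ^ (w + 1)) :
    (rotC w)^[m] N = (rotC w)^[m % (w + 1)] N := by
  conv_lhs => rw [show m = (w + 1) * (m / (w + 1)) + m % (w + 1) from (Nat.div_add_mod m (w + 1)).symm]
  rw [Function.iterate_add_apply]
  exact rotC_iter_mul w _ _ (rotC_iter_lt w _ N h)

-- iterating the step on a pure state is iterating the combined rotation
theorem iter_pure (cb M : Int) (w mw : Nat) (hw : 1 ≤ w) (hm : w ≤ mw)
    (hcb : cb = ((2 ^ (w - 1) : Nat) : Int)) (hM : M = ((2 ^ mw - 1 : Nat) : Int)) :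
    ∀ (k v c : Nat), v < 2 ^ w → c < 2 →
    (rcrStepB cb M)^[k] ((v : Int), (c : Int))
      = (↑((rotC w)^[k] (c * 2 ^ w + v) % 2 ^ w), ↑((rotC w)^[k] (c * 2 ^ w + v) / 2 ^ w)) := by
  intro k
  induction k with
  | zero =>
    intro v c hv hc
    simp only [Function.iterate_zero, id_eq]
    have hcm : c * 2 ^ w + v = 2 ^ w * c + v := by ring
    have hm' : (c * 2 ^ w + v) % 2 ^ w = v := by rw [hcm, Nat.mul_add_mod, Nat.mod_eq_of_lt hv]
    have hd' : (c * 2 ^ w + v) / 2 ^ w = c := by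
      rw [hcm, Nat.mul_add_div (by positivity), Nat.div_eq_of_lt hv, add_zero]
    rw [hm', hd']
  | succ k ih =>
    intro v c hv hc
    rw [Function.iterate_succ_apply, step_pure cb M w mw hw hm hcb hM v c hv hc]
    have hcw : c * 2 ^ w ≤ 1 * 2 ^ w := Nat.mul_le_mul_right _ (by omega)
    have hN : c * 2 ^ w + v < 2 ^ (w + 1) := by rw [pow_succ]; omega
    set Mv := rotC w (c * 2 ^ w + v) with hMv
    have hrlt : Mv < 2 ^ (w + 1) := rotC_lt w _ hN
    have hv' : Mv % 2 ^ w < 2 ^ w := Nat.mod_lt _ (by positivity)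
    have hc' : Mv / 2 ^ w < 2 := by
      apply Nat.div_lt_of_lt_mul
      rw [pow_succ] at hrlt; omega
    rw [ih (Mv % 2 ^ w) (Mv / 2 ^ w) hv' hc']
    have hre : Mv / 2 ^ w * 2 ^ w + Mv % 2 ^ w = Mv := by
      rw [mul_comm]; exact Nat.div_add_mod Mv (2 ^ w)
    rw [hre, Function.iterate_succ_apply, ← hMv]

-- B's shift/or/mask expression computes the rotation by r
theorem comb_formula (w : Nat) (r : Nat) (hr : r < w + 1) (N : Nat) (hN : N < 2 ^ (w + 1)) :
    PySem.Int.band (PySem.Int.bor ((N : Int) >>> r) ((N : Int) <<< (w + 1 - r))) ((1 <<< (w + 1)) - 1)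
      = ↑((rotC w)^[r] N) := by
  have h1 : ((N : Int) >>> r) = ((N >>> r : Nat) : Int) := rfl
  have h2 : ((N : Int) <<< (w + 1 - r)) = ((N <<< (w + 1 - r) : Nat) : Int) := rfl
  have h5 : 1 ≤ (1 <<< (w + 1) : Nat) := by rw [Nat.shiftLeft_eq, one_mul]; exact Nat.one_le_two_pow
  have h4 : ((1 <<< (w + 1) : Nat) : Int) - (1 : Int) = (((1 <<< (w + 1)) - 1 : Nat) : Int) := by
    push_cast [h5]; ring
  rw [h1, h2, PySem.Int.bor_natCast, h4, PySem.Int.band_natCast]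
  congr 1
  rw [Nat.shiftLeft_eq, Nat.shiftLeft_eq, Nat.shiftRight_eq_div_pow, one_mul,
    Nat.and_two_pow_sub_one_eq_mod, rotC_formula w r (le_of_lt hr) N hN]
  have hpow : (2 : Nat) ^ (w + 1 - r) * 2 ^ r = 2 ^ (w + 1) := by rw [← pow_add]; congr 1; omega
  have hb : N / 2 ^ r < 2 ^ (w + 1 - r) := by
    apply Nat.div_lt_of_lt_mul
    calc N < 2 ^ (w + 1) := hN
      _ = 2 ^ r * 2 ^ (w + 1 - r) := by rw [← pow_add]; congr 1; omega
  have hor : N / 2 ^ r ||| N * 2 ^ (w + 1 - r) = 2 ^ (w + 1 - r) * N + N / 2 ^ r := by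
    rw [Nat.lor_comm, mul_comm N]
    exact (Nat.two_pow_add_eq_or_of_lt hb N).symm
  rw [hor]
  have hdm : 2 ^ r * (N / 2 ^ r) + N % 2 ^ r = N := Nat.div_add_mod N (2 ^ r)
  have hRlt : N % 2 ^ r < 2 ^ r := Nat.mod_lt _ (by positivity)
  have hsplit : 2 ^ (w + 1 - r) * N + N / 2 ^ r
      = 2 ^ (w + 1) * (N / 2 ^ r) + (2 ^ (w + 1 - r) * (N % 2 ^ r) + N / 2 ^ r) := by
    calc 2 ^ (w + 1 - r) * N + N / 2 ^ r
        = 2 ^ (w + 1 - r) * (2 ^ r * (N / 2 ^ r) + N % 2 ^ r) + N / 2 ^ r := by rw [hdm]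
      _ = (2 ^ (w + 1 - r) * 2 ^ r) * (N / 2 ^ r) + (2 ^ (w + 1 - r) * (N % 2 ^ r) + N / 2 ^ r) := by ring
      _ = 2 ^ (w + 1) * (N / 2 ^ r) + (2 ^ (w + 1 - r) * (N % 2 ^ r) + N / 2 ^ r) := by rw [hpow]
  rw [hsplit, Nat.mul_add_mod]
  have hlt2 : 2 ^ (w + 1 - r) * (N % 2 ^ r) + N / 2 ^ r < 2 ^ (w + 1) := by
    have ha : 2 ^ (w + 1 - r) * (N % 2 ^ r) ≤ 2 ^ (w + 1 - r) * (2 ^ r - 1) :=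
      Nat.mul_le_mul_left _ (by omega)
    have hb2 : 2 ^ (w + 1 - r) * (2 ^ r - 1) = 2 ^ (w + 1) - 2 ^ (w + 1 - r) := by
      rw [Nat.mul_sub, hpow, mul_one]
    have h1' : 1 ≤ (2 : Nat) ^ (w + 1 - r) := Nat.one_le_two_pow
    have he : (2:Nat) ^ (w + 1 - r) ≤ 2 ^ (w + 1) := Nat.pow_le_pow_right (by norm_num) (by omega)
    calc 2 ^ (w + 1 - r) * (N % 2 ^ r) + N / 2 ^ r
        ≤ 2 ^ (w + 1 - r) * (2 ^ r - 1) + N / 2 ^ r := Nat.add_le_add_right ha _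
      _ = 2 ^ (w + 1) - 2 ^ (w + 1 - r) + N / 2 ^ r := by rw [hb2]
      _ < 2 ^ (w + 1) - 2 ^ (w + 1 - r) + 2 ^ (w + 1 - r) := Nat.add_lt_add_left hb _
      _ = 2 ^ (w + 1) := by omega
  rw [Nat.mod_eq_of_lt hlt2]
  ring

-- repeated shrinking steps reach a pure state
theorem desc (cb M : Int) (w : Nat) (hw : 1 ≤ w) (hcb : cb = ((2 ^ (w - 1) : Nat) : Int)) :
    ∀ (d v c : Nat), v < 2 ^ (w + d) → c < 2 →
    ∃ v' c' : Nat, (rcrStepB cb M)^[d] ((v : Int), (c : Int)) = (↑v', ↑c') ∧ v' < 2 ^ w ∧ c' < 2 := by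
  intro d
  induction d with
  | zero => intro v c hv hc; exact ⟨v, c, rfl, by simpa using hv, hc⟩
  | succ d ih =>
    intro v c hv hc
    have hv' : v < 2 ^ ((w + d) + 1) := by rw [show (w + d) + 1 = w + (d + 1) by omega]; exact hv
    obtain ⟨v1, c1, h1, hv1, hc1⟩ := step_shrink cb M w (w + d) hw (by omega) hcb v c hv' hc
    rw [Function.iterate_succ_apply, h1]
    exact ih v1 c1 hv1 hc1

-- after nine steps the state is pure: one bounding step plus at most eight shrinking steps
theorem purity9 (cb M : Int) (w mw : Nat) (hw : 1 ≤ w) (hd : mw ≤ w + 8)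
    (hcb : cb = ((2 ^ (w - 1) : Nat) : Int)) (hM : M = ((2 ^ mw - 1 : Nat) : Int)) (s0 : Int × Int) :
    ∃ v c : Nat, (rcrStepB cb M)^[9] s0 = (↑v, ↑c) ∧ v < 2 ^ w ∧ c < 2 := by
  obtain ⟨v1, c1, h1, hv1, hc1⟩ := step_bound cb M mw hM s0
  rw [show (9 : Nat) = 8 + 1 from rfl, Function.iterate_succ_apply, h1]
  exact desc cb M w hw hcb 8 v1 c1 (lt_of_lt_of_le hv1 (Nat.pow_le_pow_right (by norm_num) hd)) hc1

-- B's whole rotate branch, evaluated on a pure state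
theorem rotate_pure (w : Nat) (hw : 1 ≤ w) (e : Nat) (v9 c9 : Nat)
    (hv9 : v9 < 2 ^ w) (hc9 : c9 < 2) (r : Nat)
    (hr : r = (PySem.Int.mod (↑e) (((w + 1 : Nat)) : Int)).toNat) (comb comb2 : Int)
    (hcomb : comb = PySem.Int.bor ((if (c9 : Int) ≠ 0 then (1 : Int) else 0) <<< w) ↑v9)
    (hcomb2 : comb2 = PySem.Int.band (PySem.Int.bor (comb >>> r) (comb <<< ((w + 1) - r))) ((1 <<< (w + 1)) - 1)) :
    (PySem.Int.band comb2 ((1 <<< w) - 1), comb2 >>> w)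
      = (↑((rotC w)^[e] (c9 * 2 ^ w + v9) % 2 ^ w), ↑((rotC w)^[e] (c9 * 2 ^ w + v9) / 2 ^ w)) := by
  have hcw : c9 * 2 ^ w ≤ 1 * 2 ^ w := Nat.mul_le_mul_right _ (by omega)
  have hN : c9 * 2 ^ w + v9 < 2 ^ (w + 1) := by rw [pow_succ]; omega
  set N := c9 * 2 ^ w + v9 with hNdef
  have hrval : r = e % (w + 1) := by
    rw [hr, PySem.Int.mod_natCast]; exact Int.toNat_natCast _
  have hrlt : r < w + 1 := by rw [hrval]; exact Nat.mod_lt _ (by omega)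
  have hcv : comb = (N : Int) := by
    rw [hcomb]
    obtain rfl | rfl : c9 = 0 ∨ c9 = 1 := by omega
    · rw [if_neg (by norm_num), show ((0 : Int) <<< w) = ((0 <<< w : Nat) : Int) from rfl,
        Nat.zero_shiftLeft, PySem.Int.bor_comm, Nat.cast_zero, PySem.Int.bor_zero]
      norm_num [hNdef]
    · rw [if_pos (by norm_num), show ((1 : Int) <<< w) = ((1 <<< w : Nat) : Int) from rfl,
        PySem.Int.bor_natCast]
      congr 1
      rw [Nat.shiftLeft_eq, one_mul, hNdef]
      have hx : 2 ^ w + v9 = 2 ^ w ||| v9 := by simpa using Nat.two_pow_add_eq_or_of_lt hv9 1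
      rw [← hx]; ring
  have hc2 : comb2 = ((rotC w)^[r] N : Nat) := by
    rw [hcomb2, hcv]
    exact comb_formula w r hrlt N hN
  have hXlt : ((rotC w)^[r] N) < 2 ^ (w + 1) := rotC_iter_lt w r N hN
  have hmask : ((1 <<< w : Nat) : Int) - (1 : Int) = (((1 <<< w) - 1 : Nat) : Int) := by
    have h5 : 1 ≤ (1 <<< w : Nat) := by rw [Nat.shiftLeft_eq, one_mul]; exact Nat.one_le_two_pow
    push_cast [h5]; ring
  have hiter : (rotC w)^[e] N = (rotC w)^[r] N := by
    rw [hrval] at *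
    exact rotC_iter_mod w e N hN
  rw [hc2, hiter]
  have hfin1 : PySem.Int.band ((((rotC w)^[r] N : Nat)) : Int) ((1 <<< w) - 1)
      = (((rotC w)^[r] N % 2 ^ w : Nat) : Int) := by
    rw [hmask, PySem.Int.band_natCast]
    congr 1
    rw [Nat.shiftLeft_eq, one_mul, Nat.and_two_pow_sub_one_eq_mod]
  have hfin2 : ((((rotC w)^[r] N : Nat)) : Int) >>> w = (((rotC w)^[r] N / 2 ^ w : Nat) : Int) := by
    rw [show ((((rotC w)^[r] N : Nat)) : Int) >>> w = (((rotC w)^[r] N >>> w : Nat) : Int) from rfl]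
    congr 1
    rw [Nat.shiftRight_eq_div_pow]
  rw [hfin1, hfin2]

-- the central lemma: A's loop state equals B's state
theorem state_eq (val count carry width : Int) :
    (PySem.List.pyRange 0 count).foldl
      (fun s _ => rcrStepA width (if width = 16 then 32768 else 128) s) (val, carry)
    = rcrStateB val count carry width := by
  rw [stepAB width (if width = 16 then 32768 else 128), foldl_const_iterate, length_pyRange0]
  simp only [rcrStateB]
  by_cases hc : count ≤ 9
  · rw [if_pos hc, foldl_const_iterate, length_pyRange0, sub_self]
    norm_num
  · rw [if_neg hc, foldl_const_iterate, length_pyRange0,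
      show ((9 : Int)).toNat = 9 from rfl]
    have hw : 1 ≤ (if width = 16 then (16 : Nat) else 8) := by split_ifs <;> norm_num
    have hm : (if width = 16 then (16 : Nat) else 8) ≤ (if width = 8 then (8 : Nat) else 16) := by
      split_ifs <;> omega
    have hd : (if width = 8 then (8 : Nat) else 16) ≤ (if width = 16 then (16 : Nat) else 8) + 8 := by
      split_ifs <;> omega
    have hcb : (if width = 16 then (32768 : Int) else 128)
        = ((2 ^ ((if width = 16 then (16 : Nat) else 8) - 1) : Nat) : Int) := by
      split_ifs <;> norm_num
    have hM : (if width = 8 then (255 : Int) else 65535)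
        = ((2 ^ (if width = 8 then (8 : Nat) else 16) - 1 : Nat) : Int) := by
      split_ifs <;> norm_num
    obtain ⟨v9, c9, h9s, hv9, hc9⟩ :=
      purity9 (if width = 16 then 32768 else 128) (if width = 8 then 255 else 65535)
        (if width = 16 then (16 : Nat) else 8) (if width = 8 then (8 : Nat) else 16)
        hw hd hcb hM (val, carry)
    have hsplit : count.toNat = (count - 9).toNat + 9 := by omega
    have hext : count - 9 = (((count - 9).toNat : Nat) : Int) := by omega
    rw [hsplit, Function.iterate_add_apply, h9s,
      iter_pure (if width = 16 then 32768 else 128) (if width = 8 then 255 else 65535)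
        (if width = 16 then (16 : Nat) else 8) (if width = 8 then (8 : Nat) else 16)
        hw hm hcb hM (count - 9).toNat v9 c9 hv9 hc9,
      if_pos (by omega : (0 : Int) < count - 9), hext]
    exact (rotate_pure (if width = 16 then (16 : Nat) else 8) hw (count - 9).toNat v9 c9 hv9 hc9
      _ rfl _ _ rfl rfl).symm

-- ===== VERDICT (by name: the statement is the Claim_ definition above) =====
theorem flags_rcr_spec : Claim_equal_flags_rcr := by
  intro val count carry width set_flag_o _
  unfold Spec_flags_rcr
  simp only [flags_rcr, flags_rcr_alt, state_eq]
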